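-- pv_equiv track=rewrite | github.com/Cloesick/dema-group | apps/dema-webshop/scripts/fix_drukbuizen_json.py | get_material_for_sku
-- ===== SOURCE A (Python) =====
-- SKU_MATERIAL_MAP = {
--     # Page 46: Kogelkraan met dubbele wartel
--     "GF161546": ("EPDM", "lijmmof", "kraagbusdichting"),  # EPDM kraagbusdichting
--     "GF161375": ("VITON", "lijmmof", "kraagbusdichting"),  # VITON kraagbusdichting
--
--     # Page 47: Bocht kogelkraan
--     "PBK": ("EPDM", "lijmmof", None),
--     "PBKI": ("EPDM", "binnendraad", "kraagbusdichting"),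
--
--     # Page 48: Membraanafsluiter / Vlinderklep
--     "PVLK": ("EPDM", "lijmmof", "zitting"),
--
--     # Page 50: Terugslagkleppen
--     "PTKM": ("EPDM", "lijmmof", "verzinkte veer"),  # Met verzinkte veer
--     "PTKZ": ("EPDM", "lijmmof", "zonder veer"),  # Zonder veer (verticale montage)
--     "GF161562": ("VITON", "lijmmof", "rvs veer"),  # Met RVS veer
--     "PTKMT": ("NBR", "lijmmof", "transparant"),  # Transparant met veer
--
--     # Page 51: Tussenklem terugslagklep / Y-terugslagklep
--     "GF161303": ("EPDM", "tussenklem", None),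
--     "PSK": ("EPDM", "lijmspie", None),  # Y-terugslagklep
--
--     # Page 52: Voetklep / Kijkglas / Vlotterkraan
--     "PVK": ("EPDM", "lijmmof", None),
--     "PKG": ("EPDM", "lijmmof", None),
-- }
--
-- def get_sku_prefix(sku):
--     """Extract the letter prefix from a SKU."""
--     prefix = ""
--     for c in sku:
--         if c.isalpha():
--             prefix += c
--         else:
--             break
--     return prefix
--
-- def get_material_for_sku(sku):
--     """Get material properties for a SKU based on its prefix or pattern."""
--     # Try exact prefix matches (longer prefixes first)
--     for length in range(min(len(sku), 10), 2, -1):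
--         prefix = sku[:length]
--         if prefix in SKU_MATERIAL_MAP:
--             return SKU_MATERIAL_MAP[prefix]
--
--     # Try letter-only prefix
--     letter_prefix = get_sku_prefix(sku)
--     if letter_prefix in SKU_MATERIAL_MAP:
--         return SKU_MATERIAL_MAP[letter_prefix]
--
--     return None
-- ===== SOURCE B (Python) =====
-- SKU_MATERIAL_MAP = {
--     "GF161546": ("EPDM", "lijmmof", "kraagbusdichting"),
--     "GF161375": ("VITON", "lijmmof", "kraagbusdichting"),
--     "PBK": ("EPDM", "lijmmof", None),
--     "PBKI": ("EPDM", "binnendraad", "kraagbusdichting"),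
--     "PVLK": ("EPDM", "lijmmof", "zitting"),
--     "PTKM": ("EPDM", "lijmmof", "verzinkte veer"),
--     "PTKZ": ("EPDM", "lijmmof", "zonder veer"),
--     "GF161562": ("VITON", "lijmmof", "rvs veer"),
--     "PTKMT": ("NBR", "lijmmof", "transparant"),
--     "GF161303": ("EPDM", "tussenklem", None),
--     "PSK": ("EPDM", "lijmspie", None),
--     "PVK": ("EPDM", "lijmmof", None),
--     "PKG": ("EPDM", "lijmmof", None),
-- }
--
-- # Keys sorted once by descending length (stable, so insertion order breaks ties).
-- _KEYS_BY_LEN = sorted(SKU_MATERIAL_MAP, key=len, reverse=True)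
--
-- def get_sku_prefix(sku):
--     """Extract the letter prefix from a SKU."""
--     prefix = ""
--     for c in sku:
--         if c.isalpha():
--             prefix += c
--         else:
--             break
--     return prefix
--
-- def get_material_for_sku(sku):
--     """Get material properties for a SKU: one scan over the key table,
--     longest matching key first thanks to the pre-sorted key list."""
--     limit = min(len(sku), 10)
--     for key in _KEYS_BY_LEN:
--         if 3 <= len(key) <= limit and sku.startswith(key):
--             return SKU_MATERIAL_MAP[key]
--     return SKU_MATERIAL_MAP.get(get_sku_prefix(sku))
-- ===== Notes on version B (the rewrite author's own statement) =====
-- stated objective: alternative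
-- what changed: A loops over descending slice lengths of the SKU and looks each slice up in the dict; B pre-sorts the key table by descending key length once and does a single first-match scan over the keys with startswith, keeping the same letter-prefix fallback.
import Mathlib
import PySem

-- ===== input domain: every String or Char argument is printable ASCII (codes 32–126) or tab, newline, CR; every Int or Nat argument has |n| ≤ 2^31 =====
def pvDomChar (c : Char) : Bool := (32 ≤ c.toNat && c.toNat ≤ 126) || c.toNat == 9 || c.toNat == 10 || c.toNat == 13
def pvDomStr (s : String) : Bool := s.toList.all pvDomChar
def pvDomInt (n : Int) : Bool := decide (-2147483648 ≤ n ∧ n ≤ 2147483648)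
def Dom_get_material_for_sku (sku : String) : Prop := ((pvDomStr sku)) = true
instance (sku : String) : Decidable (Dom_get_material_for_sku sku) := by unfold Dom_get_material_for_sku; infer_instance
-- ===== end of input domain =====

-- B replaces A's descending-prefix-length loop (slice the SKU, look each slice up) by a
-- single scan over the key table pre-sorted by descending key length (objective:
-- alternative decomposition, same cost).

-- ===== PORT A =====
-- the module-level dict SKU_MATERIAL_MAP
def SKU_MATERIAL_MAP : PySem.Dict String (String × String × Option String) :=
  PySem.Dict.ofList
    [ ("GF161546", ("EPDM", "lijmmof", some "kraagbusdichting"))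
    , ("GF161375", ("VITON", "lijmmof", some "kraagbusdichting"))
    , ("PBK", ("EPDM", "lijmmof", none))
    , ("PBKI", ("EPDM", "binnendraad", some "kraagbusdichting"))
    , ("PVLK", ("EPDM", "lijmmof", some "zitting"))
    , ("PTKM", ("EPDM", "lijmmof", some "verzinkte veer"))
    , ("PTKZ", ("EPDM", "lijmmof", some "zonder veer"))
    , ("GF161562", ("VITON", "lijmmof", some "rvs veer"))
    , ("PTKMT", ("NBR", "lijmmof", some "transparant"))
    , ("GF161303", ("EPDM", "tussenklem", none))
    , ("PSK", ("EPDM", "lijmspie", none))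
    , ("PVK", ("EPDM", "lijmmof", none))
    , ("PKG", ("EPDM", "lijmmof", none)) ]

-- helper get_sku_prefix: the for-loop with break, as structural recursion over the chars
def pvPrefixChars : List Char → List Char
  | [] => []
  | c :: rest => if PySem.Chars.isalpha c then c :: pvPrefixChars rest else []

def get_sku_prefix (sku : String) : String := String.ofList (pvPrefixChars sku.toList)

-- A's for-loop over the descending length range, with early return
def pvALoop (sku : String) : List Int → Option (String × String × Option String)
  | [] => none
  | l :: ls =>
    match SKU_MATERIAL_MAP.get? (PySem.Str.slice sku none (some l)) with
    | some v => some v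
    | none => pvALoop sku ls

def get_material_for_sku (sku : String) : Option (String × String × Option String) :=
  match pvALoop sku (PySem.List.pyRange (min (PySem.Str.len sku) 10) 2 (-1)) with
  | some v => some v
  | none =>
    match SKU_MATERIAL_MAP.get? (get_sku_prefix sku) with
    | some v => some v
    | none => none

-- ===== PORT B =====
-- module-level: sorted(SKU_MATERIAL_MAP, key=len, reverse=True)
def pvKeysByLen : List String := PySem.List.sorted SKU_MATERIAL_MAP.keys PySem.Str.len true

-- B's single scan over the pre-sorted key table, with early return
-- (get? stands for the subscript SKU_MATERIAL_MAP[key]; every scanned key is a dict key)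
def pvBLoop (sku : String) (limit : Int) : List String → Option (String × String × Option String)
  | [] => none
  | k :: ks =>
    if 3 ≤ PySem.Str.len k ∧ PySem.Str.len k ≤ limit ∧ PySem.Str.startswith sku k then
      SKU_MATERIAL_MAP.get? k
    else pvBLoop sku limit ks

def get_material_for_sku_alt (sku : String) : Option (String × String × Option String) :=
  match pvBLoop sku (min (PySem.Str.len sku) 10) pvKeysByLen with
  | some v => some v
  | none => SKU_MATERIAL_MAP.get? (get_sku_prefix sku)

-- ===== PRECONDITION & SPEC =====
def Spec_get_material_for_sku (sku : String) (out : Option (String × String × Option String)) : Prop := out = get_material_for_sku_alt sku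
instance (sku : String) (out : Option (String × String × Option String)) : Decidable (Spec_get_material_for_sku sku out) := by unfold Spec_get_material_for_sku; infer_instance

-- ===== CLAIM (what is proved, stated in full; the proofs are below) =====
def Claim_equal_get_material_for_sku : Prop := ∀ (sku : String), Dom_get_material_for_sku sku → Spec_get_material_for_sku sku (get_material_for_sku sku)

-- ===== LEMMAS AND PROOFS =====
theorem MAP_eq : SKU_MATERIAL_MAP = PySem.Dict.mk
    [ ("GF161546", ("EPDM", "lijmmof", some "kraagbusdichting"))
    , ("GF161375", ("VITON", "lijmmof", some "kraagbusdichting"))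
    , ("PBK", ("EPDM", "lijmmof", none))
    , ("PBKI", ("EPDM", "binnendraad", some "kraagbusdichting"))
    , ("PVLK", ("EPDM", "lijmmof", some "zitting"))
    , ("PTKM", ("EPDM", "lijmmof", some "verzinkte veer"))
    , ("PTKZ", ("EPDM", "lijmmof", some "zonder veer"))
    , ("GF161562", ("VITON", "lijmmof", some "rvs veer"))
    , ("PTKMT", ("NBR", "lijmmof", some "transparant"))
    , ("GF161303", ("EPDM", "tussenklem", none))
    , ("PSK", ("EPDM", "lijmspie", none))
    , ("PVK", ("EPDM", "lijmmof", none))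
    , ("PKG", ("EPDM", "lijmmof", none)) ] := by decide

theorem pvKeysByLen_eq : pvKeysByLen =
    ["GF161546", "GF161375", "GF161562", "GF161303", "PTKMT",
     "PBKI", "PVLK", "PTKM", "PTKZ", "PBK", "PSK", "PVK", "PKG"] := by decide

theorem str_beq_toList (a b : String) : (a == b) = (a.toList == b.toList) := by
  apply Bool.eq_iff_iff.mpr
  simp [String.ext_iff]

theorem take_beq_startswith (cs ks : List Char) :
    (cs.take ks.length == ks) = PySem.Chars.startswith cs ks := by
  simp only [PySem.Chars.startswith]
  apply Bool.eq_iff_iff.mpr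
  rw [beq_iff_eq, List.isPrefixOf_iff_prefix, List.prefix_iff_eq_take]
  exact eq_comm

-- comparing a key of the right length with the slice sku[:n] is startswith
theorem beq_slice_sw (sku k : String) (n : Int) (h0 : 0 ≤ n)
    (h : k.toList.length = n.toNat) :
    (k == PySem.Str.slice sku none (some n)) = PySem.Str.startswith sku k := by
  rw [Bool.beq_comm, str_beq_toList]
  simp only [PySem.Str.toList_slice, PySem.Chars.slice_eq_listSlice,
    PySem.List.slice_to _ h0]
  rw [← h, take_beq_startswith, PySem.Str.startswith_eq]

-- comparing a key of the wrong length with the slice sku[:n] is always false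
theorem beq_slice_false (sku k : String) (n : Int) (h0 : 0 ≤ n)
    (h1 : n.toNat ≤ sku.toList.length) (h2 : k.toList.length ≠ n.toNat) :
    (k == PySem.Str.slice sku none (some n)) = false := by
  rw [Bool.beq_comm, str_beq_toList]
  simp only [PySem.Str.toList_slice, PySem.Chars.slice_eq_listSlice,
    PySem.List.slice_to _ h0]
  simp only [beq_eq_false_iff_ne, ne_eq]
  intro he
  apply h2; rw [← he, List.length_take, Nat.min_eq_left h1]

theorem pvALoop_nil (sku : String) : pvALoop sku [] = none := rfl

theorem pvALoop_cons (sku : String) (l : Int) (ls : List Int) :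
    pvALoop sku (l :: ls) =
      (SKU_MATERIAL_MAP.get? (PySem.Str.slice sku none (some l))).or (pvALoop sku ls) := by
  cases h : SKU_MATERIAL_MAP.get? (PySem.Str.slice sku none (some l)) <;>
    simp [pvALoop, h]

theorem or_ite {V : Type} (c : Prop) [Decidable c] (a b e : Option V) :
    (if c then a else b).or e = if c then a.or e else b.or e := by
  split <;> rfl

-- every key in the table has length ≥ 3, so under a limit < 3 the scan finds nothing
theorem pvBLoop_none_of_small (sku : String) (limit : Int) (h : limit < 3)
    (ks : List String) (hk : ∀ k ∈ ks, 3 ≤ PySem.Str.len k) :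
    pvBLoop sku limit ks = none := by
  induction ks with
  | nil => rfl
  | cons k ks ih =>
    have h3 := hk k (by simp)
    rw [pvBLoop, if_neg (by rintro ⟨-, h2, -⟩; omega)]
    exact ih fun k hk' => hk k (by simp [hk'])

theorem eq_slice_sw (sku k : String) (n : Int) (h0 : 0 ≤ n)
    (h : ((k.toList.length : Int)) = n) :
    (k = PySem.Str.slice sku none (some n)) ↔ PySem.Str.startswith sku k = true := by
  have h' : k.toList.length = n.toNat := by omega
  rw [← beq_slice_sw sku k n h0 h']
  exact ⟨fun he => by rw [he]; exact beq_self_eq_true _, fun hb => eq_of_beq hb⟩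

theorem eq_slice_false' (sku k : String) (n : Int) (h0 : 0 ≤ n)
    (h1 : n ≤ ((sku.toList.length : Int))) (h2 : ((k.toList.length : Int)) ≠ n) :
    (k = PySem.Str.slice sku none (some n)) ↔ False := by
  have := beq_slice_false sku k n h0 (by omega) (by omega)
  simp only [beq_eq_false_iff_ne, ne_eq] at this
  exact ⟨fun he => this he, False.elim⟩

theorem get?_mk_nil {κ ν : Type} [BEq κ] (x : κ) :
    (PySem.Dict.mk ([] : List (κ × ν))).get? x = none := rfl

theorem loops_eq (sku : String) :
    pvALoop sku (PySem.List.pyRange (min (PySem.Str.len sku) 10) 2 (-1)) =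
    pvBLoop sku (min (PySem.Str.len sku) 10) pvKeysByLen := by
  simp only [PySem.Str.len_eq, pvKeysByLen_eq]
  rcases Nat.lt_or_ge sku.toList.length 3 with hs | hge3
  · -- len sku < 3: the range is empty and no key fits under the limit
    rw [PySem.List.pyRange_neg_one_eq_nil (by omega), pvALoop_nil,
      pvBLoop_none_of_small sku _ (by omega) _ (by decide)]
  rcases Nat.lt_or_ge sku.toList.length 4 with hlt3 | hge4
  · -- len sku = 3
    have hmin : min ((sku.toList.length : Int)) 10 = 3 := by omega
    have h3 : (3:Int) ≤ ((sku.length : Int)) := by rw [← String.length_toList]; omega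
    rw [hmin, show PySem.List.pyRange 3 2 (-1) = [3] from by decide]
    simp only [pvALoop_cons, pvALoop_nil, MAP_eq, PySem.Dict.get?_mk_cons]
    simp [eq_slice_sw, eq_slice_false', h3, pvBLoop,
      PySem.Str.len_eq, get?_mk_nil, MAP_eq, PySem.Dict.get?_mk_cons]
  rcases Nat.lt_or_ge sku.toList.length 5 with hlt4 | hge5
  · -- len sku = 4
    have hmin : min ((sku.toList.length : Int)) 10 = 4 := by omega
    have h3 : (3:Int) ≤ ((sku.length : Int)) := by rw [← String.length_toList]; omega
    have h4 : (4:Int) ≤ ((sku.length : Int)) := by rw [← String.length_toList]; omega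
    rw [hmin, show PySem.List.pyRange 4 2 (-1) = [4, 3] from by decide]
    simp only [pvALoop_cons, pvALoop_nil, MAP_eq, PySem.Dict.get?_mk_cons]
    simp [eq_slice_sw, eq_slice_false', h3, h4, or_ite, pvBLoop,
      PySem.Str.len_eq, get?_mk_nil, MAP_eq, PySem.Dict.get?_mk_cons]
  rcases Nat.lt_or_ge sku.toList.length 6 with hlt5 | hge6
  · -- len sku = 5
    have hmin : min ((sku.toList.length : Int)) 10 = 5 := by omega
    have h3 : (3:Int) ≤ ((sku.length : Int)) := by rw [← String.length_toList]; omega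
    have h4 : (4:Int) ≤ ((sku.length : Int)) := by rw [← String.length_toList]; omega
    have h5 : (5:Int) ≤ ((sku.length : Int)) := by rw [← String.length_toList]; omega
    rw [hmin, show PySem.List.pyRange 5 2 (-1) = [5, 4, 3] from by decide]
    simp only [pvALoop_cons, pvALoop_nil, MAP_eq, PySem.Dict.get?_mk_cons]
    simp [eq_slice_sw, eq_slice_false', h3, h4, h5, or_ite, pvBLoop,
      PySem.Str.len_eq, get?_mk_nil, MAP_eq, PySem.Dict.get?_mk_cons]
  rcases Nat.lt_or_ge sku.toList.length 7 with hlt6 | hge7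
  · -- len sku = 6
    have hmin : min ((sku.toList.length : Int)) 10 = 6 := by omega
    have h3 : (3:Int) ≤ ((sku.length : Int)) := by rw [← String.length_toList]; omega
    have h4 : (4:Int) ≤ ((sku.length : Int)) := by rw [← String.length_toList]; omega
    have h5 : (5:Int) ≤ ((sku.length : Int)) := by rw [← String.length_toList]; omega
    have h6 : (6:Int) ≤ ((sku.length : Int)) := by rw [← String.length_toList]; omega
    rw [hmin, show PySem.List.pyRange 6 2 (-1) = [6, 5, 4, 3] from by decide]
    simp only [pvALoop_cons, pvALoop_nil, MAP_eq, PySem.Dict.get?_mk_cons]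
    simp [eq_slice_sw, eq_slice_false', h3, h4, h5, h6, or_ite, pvBLoop,
      PySem.Str.len_eq, get?_mk_nil, MAP_eq, PySem.Dict.get?_mk_cons]
  rcases Nat.lt_or_ge sku.toList.length 8 with hlt7 | hge8
  · -- len sku = 7
    have hmin : min ((sku.toList.length : Int)) 10 = 7 := by omega
    have h3 : (3:Int) ≤ ((sku.length : Int)) := by rw [← String.length_toList]; omega
    have h4 : (4:Int) ≤ ((sku.length : Int)) := by rw [← String.length_toList]; omega
    have h5 : (5:Int) ≤ ((sku.length : Int)) := by rw [← String.length_toList]; omega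
    have h6 : (6:Int) ≤ ((sku.length : Int)) := by rw [← String.length_toList]; omega
    have h7 : (7:Int) ≤ ((sku.length : Int)) := by rw [← String.length_toList]; omega
    rw [hmin, show PySem.List.pyRange 7 2 (-1) = [7, 6, 5, 4, 3] from by decide]
    simp only [pvALoop_cons, pvALoop_nil, MAP_eq, PySem.Dict.get?_mk_cons]
    simp [eq_slice_sw, eq_slice_false', h3, h4, h5, h6, h7, or_ite, pvBLoop,
      PySem.Str.len_eq, get?_mk_nil, MAP_eq, PySem.Dict.get?_mk_cons]
  rcases Nat.lt_or_ge sku.toList.length 9 with hlt8 | hge9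
  · -- len sku = 8
    have hmin : min ((sku.toList.length : Int)) 10 = 8 := by omega
    have h3 : (3:Int) ≤ ((sku.length : Int)) := by rw [← String.length_toList]; omega
    have h4 : (4:Int) ≤ ((sku.length : Int)) := by rw [← String.length_toList]; omega
    have h5 : (5:Int) ≤ ((sku.length : Int)) := by rw [← String.length_toList]; omega
    have h6 : (6:Int) ≤ ((sku.length : Int)) := by rw [← String.length_toList]; omega
    have h7 : (7:Int) ≤ ((sku.length : Int)) := by rw [← String.length_toList]; omega
    have h8 : (8:Int) ≤ ((sku.length : Int)) := by rw [← String.length_toList]; omega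
    rw [hmin, show PySem.List.pyRange 8 2 (-1) = [8, 7, 6, 5, 4, 3] from by decide]
    simp only [pvALoop_cons, pvALoop_nil, MAP_eq, PySem.Dict.get?_mk_cons]
    simp [eq_slice_sw, eq_slice_false', h3, h4, h5, h6, h7, h8, or_ite, pvBLoop,
      PySem.Str.len_eq, get?_mk_nil, MAP_eq, PySem.Dict.get?_mk_cons]
  rcases Nat.lt_or_ge sku.toList.length 10 with hlt9 | hge10
  · -- len sku = 9
    have hmin : min ((sku.toList.length : Int)) 10 = 9 := by omega
    have h3 : (3:Int) ≤ ((sku.length : Int)) := by rw [← String.length_toList]; omega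
    have h4 : (4:Int) ≤ ((sku.length : Int)) := by rw [← String.length_toList]; omega
    have h5 : (5:Int) ≤ ((sku.length : Int)) := by rw [← String.length_toList]; omega
    have h6 : (6:Int) ≤ ((sku.length : Int)) := by rw [← String.length_toList]; omega
    have h7 : (7:Int) ≤ ((sku.length : Int)) := by rw [← String.length_toList]; omega
    have h8 : (8:Int) ≤ ((sku.length : Int)) := by rw [← String.length_toList]; omega
    have h9 : (9:Int) ≤ ((sku.length : Int)) := by rw [← String.length_toList]; omega
    rw [hmin, show PySem.List.pyRange 9 2 (-1) = [9, 8, 7, 6, 5, 4, 3] from by decide]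
    simp only [pvALoop_cons, pvALoop_nil, MAP_eq, PySem.Dict.get?_mk_cons]
    simp [eq_slice_sw, eq_slice_false', h3, h4, h5, h6, h7, h8, h9, or_ite, pvBLoop,
      PySem.Str.len_eq, get?_mk_nil, MAP_eq, PySem.Dict.get?_mk_cons]
  · -- len sku >= 10
    have hmin : min ((sku.toList.length : Int)) 10 = 10 := by omega
    have h3 : (3:Int) ≤ ((sku.length : Int)) := by rw [← String.length_toList]; omega
    have h4 : (4:Int) ≤ ((sku.length : Int)) := by rw [← String.length_toList]; omega
    have h5 : (5:Int) ≤ ((sku.length : Int)) := by rw [← String.length_toList]; omega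
    have h6 : (6:Int) ≤ ((sku.length : Int)) := by rw [← String.length_toList]; omega
    have h7 : (7:Int) ≤ ((sku.length : Int)) := by rw [← String.length_toList]; omega
    have h8 : (8:Int) ≤ ((sku.length : Int)) := by rw [← String.length_toList]; omega
    have h9 : (9:Int) ≤ ((sku.length : Int)) := by rw [← String.length_toList]; omega
    have h10 : (10:Int) ≤ ((sku.length : Int)) := by rw [← String.length_toList]; omega
    rw [hmin, show PySem.List.pyRange 10 2 (-1) = [10, 9, 8, 7, 6, 5, 4, 3] from by decide]
    simp only [pvALoop_cons, pvALoop_nil, MAP_eq, PySem.Dict.get?_mk_cons]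
    simp [eq_slice_sw, eq_slice_false', h3, h4, h5, h6, h7, h8, h9, h10, or_ite, pvBLoop,
      PySem.Str.len_eq, get?_mk_nil, MAP_eq, PySem.Dict.get?_mk_cons]

-- ===== VERDICT (by name: the statement is the Claim_ definition above) =====
theorem get_material_for_sku_spec : Claim_equal_get_material_for_sku := by
  intro sku _
  unfold Spec_get_material_for_sku get_material_for_sku get_material_for_sku_alt
  rw [loops_eq]
  cases hB : pvBLoop sku (min (PySem.Str.len sku) 10) pvKeysByLen with
  | some v => rfl
  | none =>
    cases hF : SKU_MATERIAL_MAP.get? (get_sku_prefix sku) <;> rfl
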